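-- pv_equiv track=rewrite | github.com/Jumaes/codon_changer | codon_changer_withortho_20190618_01.py | find_orthos
-- ===== SOURCE A (Python) =====
-- def find_orthos(intrip,inlist):
--     triscores =[]
--     for tri in inlist:
--         score = 0
--         for x,c in enumerate(tri):
--             if c == intrip[x]:
--                 score += 1
--         triscores.append(score)
--     #print (triscores)
--     minscore = min(triscores)
--     outlist = []
--     for x in range(0,len(inlist)):
--         if triscores[x] == minscore:
--             outlist.append(inlist[x])
--     return outlist
-- ===== SOURCE B (Python) =====
-- def find_orthos(intrip, inlist):
--     best = None
--     out = []
--     for tri in inlist: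
--         score = sum(1 for x, c in enumerate(tri) if c == intrip[x])
--         if best is None or score < best:
--             best = score
--             out = [tri]
--         elif score == best:
--             out.append(tri)
--     return out
-- ===== Notes on version B (the rewrite author's own statement) =====
-- stated objective: simpler
-- what changed: Single online pass keeping a running minimum score and the current min-score group (reset on a new minimum, append on a tie); this removes A's materialised score list, the separate min() call and the second index-driven filtering pass.
import Mathlib
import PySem

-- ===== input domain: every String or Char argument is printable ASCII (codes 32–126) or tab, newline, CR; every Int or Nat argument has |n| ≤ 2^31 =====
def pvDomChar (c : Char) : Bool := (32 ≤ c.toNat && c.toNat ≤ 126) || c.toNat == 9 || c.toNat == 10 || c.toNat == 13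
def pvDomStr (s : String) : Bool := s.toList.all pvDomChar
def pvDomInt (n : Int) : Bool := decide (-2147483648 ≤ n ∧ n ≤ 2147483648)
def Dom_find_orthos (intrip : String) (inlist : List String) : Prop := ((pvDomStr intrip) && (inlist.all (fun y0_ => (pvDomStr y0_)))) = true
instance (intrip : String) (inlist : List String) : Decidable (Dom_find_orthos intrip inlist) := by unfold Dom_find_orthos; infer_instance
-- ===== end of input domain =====

-- B makes a single online pass keeping the running minimum score and the current
-- min-score group (reset on a new minimum, append on a tie), instead of A's
-- materialised score list, min() call and second indexed filtering pass (objective: simpler).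

-- ===== PORT A =====
-- A's inner loop: 'score = 0; for x,c in enumerate(tri): if c == intrip[x]: score += 1'
-- (intrip[x] out of range raises IndexError in Python: pyGet? = none there, excluded by Pre_)
def pvScoreA (intrip : String) (tri : String) : Int :=
  (PySem.List.enumerate tri.toList 0).foldl
    (fun score p => if PySem.Str.pyGet? intrip p.1 == some p.2 then score + 1 else score) 0

def find_orthos (intrip : String) (inlist : List String) : List String :=
  let triscores : List Int := inlist.foldl (fun acc tri => acc ++ [pvScoreA intrip tri]) []
  match PySem.List.min? triscores (fun x => x) with
  | none => []   -- Python: min([]) raises ValueError; excluded by Pre_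
  | some minscore =>
    (PySem.List.pyRange 0 (inlist.length : Int) 1).foldl
      (fun outlist x =>
        if PySem.List.pyGetD triscores x 0 == minscore
        then outlist ++ [PySem.List.pyGetD inlist x ""] else outlist) []

-- ===== PORT B =====
-- B's scoring: 'sum(1 for x, c in enumerate(tri) if c == intrip[x])'
-- (intrip[x] out of range raises IndexError in Python, as in A: pyGet? = none there, excluded by Pre_)
def pvScoreB (intrip : String) (tri : String) : Int :=
  (((PySem.List.enumerate tri.toList 0).filter
      (fun p => PySem.Str.pyGet? intrip p.1 == some p.2)).map (fun _ => (1 : Int))).sum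

-- B's loop state: None before the first item, then (best score so far, current min-score group)
def pvStepB (intrip : String) (st : Option (Int × List String)) (tri : String) :
    Option (Int × List String) :=
  let score := pvScoreB intrip tri
  match st with
  | none => some (score, [tri])
  | some (best, out) =>
    if score < best then some (score, [tri])
    else if score == best then some (best, out ++ [tri])
    else some (best, out)

def find_orthos_alt (intrip : String) (inlist : List String) : List String :=
  match inlist.foldl (pvStepB intrip) none with
  | none => []   -- best is None: empty inlist (A raises ValueError there; excluded by Pre_)
  | some (_, out) => out

-- ===== PRECONDITION & SPEC =====
-- Pre_ excludes exactly the inputs where the Python A raises: the empty list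
-- (min of an empty sequence, ValueError) and any item longer than intrip (intrip[x], IndexError).
def Pre_find_orthos (intrip : String) (inlist : List String) : Prop :=
  inlist ≠ [] ∧ ∀ tri ∈ inlist, tri.toList.length ≤ intrip.toList.length
instance (intrip : String) (inlist : List String) : Decidable (Pre_find_orthos intrip inlist) := by unfold Pre_find_orthos; infer_instance

def pvWitness_find_orthos : String × List String := ("abc", ["abc", "xyz", "ab"])

def Spec_find_orthos (intrip : String) (inlist : List String) (out : List String) : Prop := out = find_orthos_alt intrip inlist
instance (intrip : String) (inlist : List String) (out : List String) : Decidable (Spec_find_orthos intrip inlist out) := by unfold Spec_find_orthos; infer_instance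

-- ===== CLAIM (what is proved, stated in full; the proofs are below) =====
def Claim_equal_find_orthos : Prop := ∀ (intrip : String) (inlist : List String), Dom_find_orthos intrip inlist → Pre_find_orthos intrip inlist → Spec_find_orthos intrip inlist (find_orthos intrip inlist)

-- ===== LEMMAS AND PROOFS =====

-- the two scorings are the same count: A's running counter is B's sum of ones over the filter
lemma pvScoreA_eq_pvScoreB (intrip tri : String) :
    pvScoreA intrip tri = pvScoreB intrip tri := by
  unfold pvScoreA pvScoreB
  rw [PySem.List.foldl_count_if]
  simp [List.countP_eq_length_filter]

-- A computes the filter of inlist at the minimum score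
lemma find_orthos_eq_filter (intrip : String) (inlist : List String) :
    find_orthos intrip inlist =
      (match PySem.List.min? (inlist.map (pvScoreA intrip)) (fun x => x) with
       | none => []
       | some m => inlist.filter (fun t => pvScoreA intrip t == m)) := by
  unfold find_orthos
  simp only [PySem.List.foldl_append_singleton_eq_map, List.nil_append]
  cases hm : PySem.List.min? (inlist.map (pvScoreA intrip)) (fun x => x) with
  | none => rfl
  | some m =>
    dsimp only
    have h0 : (0 : Int) = pvScoreA intrip "" := rfl
    rw [show (fun (outlist : List String) (x : Int) =>
        if PySem.List.pyGetD (inlist.map (pvScoreA intrip)) x 0 == m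
        then outlist ++ [PySem.List.pyGetD inlist x ""] else outlist)
      = (fun outlist x =>
        (fun (acc : List String) (t : String) => if pvScoreA intrip t == m then acc ++ [t] else acc)
          outlist (PySem.List.pyGetD inlist x "")) from by
        funext outlist x
        rw [h0, PySem.List.pyGetD_map]]
    rw [PySem.List.foldl_pyRange_zero_pyGetD' inlist ""
      (fun acc t => if pvScoreA intrip t == m then acc ++ [t] else acc) []]
    rw [PySem.List.foldl_append_if_eq_filter, List.nil_append]

-- B's running-minimum loop: invariant over the processed prefix
lemma foldl_stepB_eq (intrip : String) : ∀ (inlist : List String), inlist ≠ [] →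
    ∃ m, PySem.List.min? (inlist.map (pvScoreB intrip)) (fun x => x) = some m ∧
      inlist.foldl (pvStepB intrip) none = some (m, inlist.filter (fun t => pvScoreB intrip t == m)) := by
  intro inlist
  induction inlist using List.reverseRecOn with
  | nil => intro h; exact absurd rfl h
  | append_singleton l t ih =>
    intro _
    by_cases hl : l = []
    · subst hl
      refine ⟨pvScoreB intrip t, ?_, ?_⟩
      · simp [PySem.List.min?_id_cons]
      · simp [pvStepB]
    · obtain ⟨m, hmin, hfold⟩ := ih hl
      obtain ⟨a, rest, hmap⟩ : ∃ a rest, l.map (pvScoreB intrip) = a :: rest := by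
        cases hE : l.map (pvScoreB intrip) with
        | nil => exact absurd (List.map_eq_nil_iff.mp hE) hl
        | cons a rest => exact ⟨a, rest, rfl⟩
      have hm : m = rest.foldl min a := by
        rw [hmap, PySem.List.min?_id_cons] at hmin
        exact (Option.some_inj.mp hmin).symm
      have hmin' : PySem.List.min? ((l ++ [t]).map (pvScoreB intrip)) (fun x => x)
          = some (min m (pvScoreB intrip t)) := by
        rw [List.map_append, hmap, List.map_singleton, List.cons_append,
          PySem.List.min?_id_cons, List.foldl_append, hm]
        simp
      have hlow : ∀ y ∈ l, m ≤ pvScoreB intrip y := by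
        intro y hy
        exact PySem.List.min?_isMin hmin _ (List.mem_map_of_mem hy)
      have hfoldl : (l ++ [t]).foldl (pvStepB intrip) none
          = pvStepB intrip (some (m, l.filter (fun u => pvScoreB intrip u == m))) t := by
        rw [List.foldl_append, hfold]; rfl
      rcases lt_trichotomy (pvScoreB intrip t) m with hlt | heq | hgt
      · refine ⟨pvScoreB intrip t, ?_, ?_⟩
        · rw [hmin', min_eq_right hlt.le]
        · rw [hfoldl]
          simp only [pvStepB, if_pos hlt]
          have hfil : l.filter (fun u => pvScoreB intrip u == pvScoreB intrip t) = [] := by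
            rw [List.filter_eq_nil_iff]
            intro u hu
            have := hlow u hu
            simp only [beq_iff_eq]
            omega
          simp [List.filter_append, hfil]
      · refine ⟨m, ?_, ?_⟩
        · rw [hmin', heq, min_self]
        · rw [hfoldl]
          simp only [pvStepB, heq]
          simp [List.filter_append, heq]
      · refine ⟨m, ?_, ?_⟩
        · rw [hmin', min_eq_left hgt.le]
        · rw [hfoldl]
          simp only [pvStepB]
          rw [if_neg (by omega), if_neg (by simp; omega)]
          simp [List.filter_append]
          omega

lemma find_orthos_alt_eq_filter (intrip : String) (inlist : List String) :
    find_orthos_alt intrip inlist =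
      (match PySem.List.min? (inlist.map (pvScoreB intrip)) (fun x => x) with
       | none => []
       | some m => inlist.filter (fun t => pvScoreB intrip t == m)) := by
  by_cases hl : inlist = []
  · subst hl; rfl
  · obtain ⟨m, hmin, hfold⟩ := foldl_stepB_eq intrip inlist hl
    unfold find_orthos_alt
    rw [hfold, hmin]

-- ===== VERDICT (by name: the statement is the Claim_ definition above) =====
theorem find_orthos_spec : Claim_equal_find_orthos := by
  intro intrip inlist _ _
  show find_orthos intrip inlist = find_orthos_alt intrip inlist
  rw [find_orthos_eq_filter, find_orthos_alt_eq_filter]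
  simp only [funext (pvScoreA_eq_pvScoreB intrip)]
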